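-- pv_equiv track=rewrite | github.com/romkey/circremote | circremote/commands/ls/code.py | basename
-- ===== SOURCE A (Python) =====
-- def basename(path):
--     """Get the basename of a path (CircuitPython compatible)"""
--     if path == "/":
--         return "/"
--     # Split by '/' and get the last part
--     parts = path.split("/")
--     # Remove empty parts and get the last non-empty part
--     for part in reversed(parts):
--         if part:
--             return part
--     return "/"
-- ===== SOURCE B (Python) =====
-- def basename(path):
--     """Get the basename of a path (CircuitPython compatible)"""
--     # Single forward pass: track the current segment and the last non-empty one.
--     best = "/"
--     cur = ""
--     for ch in path:
--         if ch == "/":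
--             if cur:
--                 best = cur
--             cur = ""
--         else:
--             cur += ch
--     return cur if cur else best
-- ===== Notes on version B (the rewrite author's own statement) =====
-- stated objective: alternative
-- what changed: Replaces split-into-parts plus reverse scan with a single forward pass that tracks the current segment and the last non-empty segment, never materialising the parts list.
import Mathlib
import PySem

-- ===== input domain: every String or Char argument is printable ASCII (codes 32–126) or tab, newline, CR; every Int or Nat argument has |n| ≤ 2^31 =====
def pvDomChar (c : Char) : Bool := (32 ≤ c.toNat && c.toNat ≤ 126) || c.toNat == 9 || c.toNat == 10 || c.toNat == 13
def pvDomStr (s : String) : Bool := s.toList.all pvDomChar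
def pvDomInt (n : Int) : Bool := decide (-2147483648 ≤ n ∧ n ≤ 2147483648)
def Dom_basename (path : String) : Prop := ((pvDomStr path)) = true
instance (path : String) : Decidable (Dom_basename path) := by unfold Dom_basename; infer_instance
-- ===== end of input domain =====

-- B replaces A's split-then-reverse-scan with one forward pass tracking the current
-- and the last non-empty segment (objective: alternative; same result, no parts list).

-- ===== PORT A =====
-- 'for part in reversed(parts): if part: return part' / fallthrough 'return "/"'
def pvLoopA : List (List Char) → String
  | [] => "/"
  | p :: ps => if p ≠ [] then String.ofList p else pvLoopA ps

def basename (path : String) : String :=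
  if path == "/" then "/"
  else pvLoopA ((PySem.Chars.splitOn path.toList ['/']).reverse)

-- ===== PORT B =====
-- loop body: on '/', promote a non-empty cur to best and reset cur; else cur += ch
def pvStepB (s : String × List Char) (ch : Char) : String × List Char :=
  if ch == '/' then ((if s.2 ≠ [] then String.ofList s.2 else s.1), [])
  else (s.1, s.2 ++ [ch])

def basename_alt (path : String) : String :=
  let st := path.toList.foldl pvStepB ("/", [])
  if st.2 ≠ [] then String.ofList st.2 else st.1

-- ===== PRECONDITION & SPEC =====
def Spec_basename (path : String) (out : String) : Prop := out = basename_alt path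
instance (path : String) (out : String) : Decidable (Spec_basename path out) := by unfold Spec_basename; infer_instance

-- ===== CLAIM (what is proved, stated in full; the proofs are below) =====
def Claim_equal_basename : Prop := ∀ (path : String), Dom_basename path → Spec_basename path (basename path)

-- ===== LEMMAS AND PROOFS =====

-- simple structural model of str.split("/")
def pvConsHead (p : List Char) : List (List Char) → List (List Char)
  | [] => [p]
  | h :: t => (p ++ h) :: t

def pvSplitSimple : List Char → List (List Char)
  | [] => [[]]
  | c :: cs => if c = '/' then [] :: pvSplitSimple cs else pvConsHead [c] (pvSplitSimple cs)

theorem pvSplitSimple_ne_nil (l : List Char) : pvSplitSimple l ≠ [] := by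
  cases l with
  | nil => simp [pvSplitSimple]
  | cons c cs =>
    simp only [pvSplitSimple]
    split
    · simp
    · cases h : pvSplitSimple cs <;> simp [pvConsHead]

theorem pvConsHead_nil (ps : List (List Char)) (h : ps ≠ []) : pvConsHead [] ps = ps := by
  cases ps with
  | nil => exact absurd rfl h
  | cons a t => simp [pvConsHead]

theorem pvConsHead_consHead (p q : List Char) (ps : List (List Char)) :
    pvConsHead p (pvConsHead q ps) = pvConsHead (p ++ q) ps := by
  cases ps <;> simp [pvConsHead]

theorem pv_splitOn_go_eq : ∀ (l : List Char) (fuel : Nat) (cur : List Char) (acc : List (List Char)),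
    l.length ≤ fuel →
    PySem.Chars.splitOn.go ['/'] fuel l cur acc = acc.reverse ++ pvConsHead cur.reverse (pvSplitSimple l) := by
  intro l
  induction l with
  | nil =>
    intro fuel cur acc _
    cases fuel <;> simp [PySem.Chars.splitOn.go, pvSplitSimple, pvConsHead]
  | cons c rest ih =>
    intro fuel cur acc hf
    cases fuel with
    | zero => simp at hf
    | succ f =>
      by_cases hc : c = '/'
      · subst hc
        have hpre : List.isPrefixOf ['/'] ('/' :: rest) = true := by simp [List.isPrefixOf]
        rw [show PySem.Chars.splitOn.go ['/'] (f+1) ('/' :: rest) cur acc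
              = PySem.Chars.splitOn.go ['/'] f (List.drop (List.length ['/']) ('/' :: rest)) [] (cur.reverse :: acc) by
              simp [PySem.Chars.splitOn.go, hpre]]
        simp only [List.length_cons, List.length_nil, List.drop_succ_cons, List.drop_zero]
        rw [ih f [] (cur.reverse :: acc) (by simpa using Nat.le_of_succ_le_succ hf)]
        simp only [List.reverse_nil]
        rw [pvConsHead_nil _ (pvSplitSimple_ne_nil rest)]
        simp [pvSplitSimple, pvConsHead]
      · have hpre : List.isPrefixOf ['/'] (c :: rest) = false := by
          have : ('/' == c) = false := beq_eq_false_iff_ne.mpr (fun h => hc h.symm)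
          simp [List.isPrefixOf, this]
        rw [show PySem.Chars.splitOn.go ['/'] (f+1) (c :: rest) cur acc
              = PySem.Chars.splitOn.go ['/'] f rest (c :: cur) acc by
              simp [PySem.Chars.splitOn.go, hpre]]
        rw [ih f (c :: cur) acc (by simpa using Nat.le_of_succ_le_succ hf)]
        simp [pvSplitSimple, hc, pvConsHead_consHead]

theorem pv_splitOn_eq (l : List Char) : PySem.Chars.splitOn l ['/'] = pvSplitSimple l := by
  rw [show PySem.Chars.splitOn l ['/'] = PySem.Chars.splitOn.go ['/'] (l.length + 1) l [] [] from rfl]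
  rw [pv_splitOn_go_eq l (l.length + 1) [] [] (Nat.le_succ _)]
  simp [pvConsHead_nil _ (pvSplitSimple_ne_nil l)]

theorem pvLoopA_eq (rs : List (List Char)) :
    pvLoopA rs = match rs.find? (fun p => decide (p ≠ [])) with
      | some p => String.ofList p
      | none => "/" := by
  induction rs with
  | nil => simp [pvLoopA]
  | cons p ps ih =>
    by_cases hp : p = []
    · subst hp; simpa [pvLoopA, List.find?] using ih
    · simp [pvLoopA, List.find?, hp]

theorem pv_foldB : ∀ (l : List Char) (best : String) (cur : List Char),
    (let st := l.foldl pvStepB (best, cur);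
     if st.2 ≠ [] then String.ofList st.2 else st.1)
    = match (pvConsHead cur (pvSplitSimple l)).reverse.find? (fun p => decide (p ≠ [])) with
      | some p => String.ofList p
      | none => best := by
  intro l
  induction l with
  | nil =>
    intro best cur
    by_cases hcur : cur = [] <;> simp [pvSplitSimple, pvConsHead, List.find?, hcur]
  | cons c rest ih =>
    intro best cur
    by_cases hc : c = '/'
    · subst hc
      have hstep : pvStepB (best, cur) '/' = ((if cur ≠ [] then String.ofList cur else best), []) := by
        simp [pvStepB]
      rw [show ('/' :: rest).foldl pvStepB (best, cur) = rest.foldl pvStepB (pvStepB (best, cur) '/') from rfl,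
          hstep]
      rw [ih (if cur ≠ [] then String.ofList cur else best) []]
      rw [pvConsHead_nil _ (pvSplitSimple_ne_nil rest)]
      have hsplit : pvSplitSimple ('/' :: rest) = [] :: pvSplitSimple rest := by
        simp [pvSplitSimple]
      rw [hsplit]
      rw [show pvConsHead cur ([] :: pvSplitSimple rest) = cur :: pvSplitSimple rest by
            simp [pvConsHead]]
      rw [show (cur :: pvSplitSimple rest).reverse = (pvSplitSimple rest).reverse ++ [cur] by simp]
      rw [List.find?_append]
      cases hfind : (pvSplitSimple rest).reverse.find? (fun p => decide (p ≠ [])) with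
      | some p => simp
      | none =>
        by_cases hcur : cur = [] <;> simp [List.find?, hcur]
    · have hstep : pvStepB (best, cur) c = (best, cur ++ [c]) := by
        simp [pvStepB, hc]
      rw [show (c :: rest).foldl pvStepB (best, cur) = rest.foldl pvStepB (pvStepB (best, cur) c) from rfl,
          hstep]
      rw [ih best (cur ++ [c])]
      have hsplit : pvSplitSimple (c :: rest) = pvConsHead [c] (pvSplitSimple rest) := by
        simp [pvSplitSimple, hc]
      rw [hsplit, pvConsHead_consHead]

-- ===== VERDICT (by name: the statement is the Claim_ definition above) =====
theorem basename_spec : Claim_equal_basename := by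
  intro path _
  unfold Spec_basename basename basename_alt
  by_cases hroot : path = "/"
  · subst hroot
    decide
  · have hne : (path == "/") = false := by
      simp [hroot]
    rw [hne]
    simp only [Bool.false_eq_true, if_false]
    rw [pv_splitOn_eq, pvLoopA_eq]
    rw [pv_foldB path.toList "/" []]
    rw [pvConsHead_nil _ (pvSplitSimple_ne_nil path.toList)]
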